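-- pv_equiv track=rewrite | github.com/kenbockler/Andmeteaduse_masin-ppe_projekt | PROJEKT/K11/S242/2021-11-10-20-25-37/kodu2.py | transponeeriK
-- ===== SOURCE A (Python) =====
-- def transponeeriK(maatriks):
--     uus_maatriks = []
--     ridade_arv = 0
--     veergude_arv = 0
--     for a in maatriks:
--         ridade_arv += 1
--         if ridade_arv == 1:
--             for b in a:
--                 veergude_arv += 1
--     for i in range(veergude_arv - 1,-1,-1):
--         järjend_elementidele = []
--         for j in range(ridade_arv - 1,-1,-1):
--             järjend_elementidele.append(maatriks[j][i])
--         uus_maatriks.append(järjend_elementidele)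
--     return uus_maatriks
-- ===== SOURCE B (Python) =====
-- def transponeeriK(maatriks):
--     if not maatriks:
--         return []
--     veerge = len(maatriks[0])
--     result = [[] for _ in range(veerge)]
--     for row in reversed(maatriks):
--         for oi in range(veerge):
--             result[oi].append(row[veerge - 1 - oi])
--     return result
-- ===== Notes on version B (the rewrite author's own statement) =====
-- stated objective: alternative
-- what changed: B replaces A's counting loop plus per-output-row gather (for each output row, scan all rows again) by one scatter pass: it preallocates the output buckets and walks the rows once in reverse, appending each row's elements into every bucket.
import Mathlib
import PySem

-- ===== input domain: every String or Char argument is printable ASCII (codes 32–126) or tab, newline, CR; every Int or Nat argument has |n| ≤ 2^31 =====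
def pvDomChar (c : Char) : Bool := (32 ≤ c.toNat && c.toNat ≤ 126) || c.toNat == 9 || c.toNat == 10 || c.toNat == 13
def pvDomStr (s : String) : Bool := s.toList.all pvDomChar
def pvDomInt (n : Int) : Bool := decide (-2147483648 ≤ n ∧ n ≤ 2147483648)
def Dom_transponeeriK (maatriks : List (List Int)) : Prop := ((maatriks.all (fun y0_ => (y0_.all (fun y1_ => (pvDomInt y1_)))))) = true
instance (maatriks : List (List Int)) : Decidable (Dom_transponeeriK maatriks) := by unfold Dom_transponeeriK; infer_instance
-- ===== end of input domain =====

-- B builds the reversed transpose by a single scatter pass over the reversed rows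
-- (appending each row's elements into preallocated output buckets) instead of A's
-- counting loop plus per-output-row gather; objective: alternative decomposition.

-- ===== PORT A =====
def transponeeriK (maatriks : List (List Int)) : List (List Int) :=
  let counts : Int × Int := maatriks.foldl
    (fun st a =>
      let ridade := st.1 + 1
      let veergude := if ridade = 1 then a.foldl (fun c _ => c + 1) st.2 else st.2
      (ridade, veergude)) (0, 0)
  (PySem.List.pyRange (counts.2 - 1) (-1) (-1)).foldl
    (fun uus i =>
      uus ++ [(PySem.List.pyRange (counts.1 - 1) (-1) (-1)).foldl
        (fun jrj j => jrj ++ [PySem.List.pyGetD (PySem.List.pyGetD maatriks j []) i 0]) []]) []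

-- ===== PORT B =====
def transponeeriK_alt (maatriks : List (List Int)) : List (List Int) :=
  match maatriks with
  | [] => []
  | r0 :: _ =>
    let veerge : Int := r0.length
    let init : List (List Int) := (PySem.List.pyRange 0 veerge 1).map (fun _ => [])
    maatriks.reverse.foldl
      (fun res row =>
        (PySem.List.pyRange 0 veerge 1).foldl
          (fun res2 oi =>
            PySem.List.pySetD res2 oi
              (PySem.List.pyGetD res2 oi [] ++ [PySem.List.pyGetD row (veerge - 1 - oi) 0])) res)
      init

-- ===== PRECONDITION & SPEC =====
-- Pre_ excludes exactly the ragged matrices with a row shorter than the first row,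
-- on which both Pythons raise IndexError.
def Pre_transponeeriK (maatriks : List (List Int)) : Prop :=
  ∀ row ∈ maatriks, (maatriks.headD []).length ≤ row.length
instance (maatriks : List (List Int)) : Decidable (Pre_transponeeriK maatriks) := by
  unfold Pre_transponeeriK; infer_instance
def pvWitness_transponeeriK : List (List Int) := [[1, 2], [3, 4], [5, 6]]

def Spec_transponeeriK (maatriks : List (List Int)) (out : List (List Int)) : Prop := out = transponeeriK_alt maatriks
instance (maatriks : List (List Int)) (out : List (List Int)) : Decidable (Spec_transponeeriK maatriks out) := by unfold Spec_transponeeriK; infer_instance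

-- ===== CLAIM (what is proved, stated in full; the proofs are below) =====
def Claim_equal_transponeeriK : Prop := ∀ (maatriks : List (List Int)), Dom_transponeeriK maatriks → Pre_transponeeriK maatriks → Spec_transponeeriK maatriks (transponeeriK maatriks)

-- ===== LEMMAS AND PROOFS =====

-- counting fold of A: row counter just counts, column counter is frozen after row 1
lemma pv_len_fold (a : List Int) (c : Int) :
    a.foldl (fun c _ => c + 1) c = c + a.length := by
  induction a generalizing c with
  | nil => simp
  | cons x xs ih => simp [List.foldl_cons, ih]; ring

lemma pv_count_fold (l : List (List Int)) (r v : Int) (hr : 1 ≤ r) :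
    l.foldl (fun st a =>
      (st.1 + 1, if st.1 + 1 = 1 then a.foldl (fun c _ => c + 1) st.2 else st.2))
      (r, v) = (r + l.length, v) := by
  induction l generalizing r with
  | nil => simp
  | cons a l ih =>
    have h1 : ¬ (r + 1 = 1) := by omega
    simp only [List.foldl_cons, h1, if_false]
    rw [ih (r + 1) (by omega)]
    simp only [List.length_cons, Prod.mk.injEq]
    refine ⟨by push_cast; ring, trivial⟩

lemma pv_map_getD_range (l : List (List Int)) :
    (List.range l.length).map (fun k => l.getD k []) = l := by
  apply List.ext_getElem
  · simp
  · intro i h1 h2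
    simp only [List.getElem_map, List.getElem_range]
    rw [List.getD_eq_getElem l [] (by simpa using h2)]

lemma pv_getD_map_range_lt (f : Nat → List Int) (m k : Nat) (hk : k < m) :
    ((List.range m).map f).getD k [] = f k := by
  rw [List.getD_eq_getElem _ [] (by simpa using hk)]
  simp

-- A's closed form: row k of the output gathers column (v-1-k) over the reversed rows
lemma pv_rows_reversed (m : List (List Int)) :
    (PySem.List.pyRange ((m.length : Int) - 1) (-1) (-1)).map
      (fun j => PySem.List.pyGetD m j []) = m.reverse := by
  have h := PySem.List.pyRange_neg_one_eq_reverse ((m.length : Int) - 1) (-1)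
  simp only [neg_add_cancel, sub_add_cancel] at h
  rw [h, List.map_reverse, PySem.List.map_pyGetD_pyRange_zero' m []]

lemma pv_A_eq (m : List (List Int)) :
    transponeeriK m =
      (List.range (m.headD []).length).map
        (fun (k : Nat) => m.reverse.map
          (fun row => PySem.List.pyGetD row ((((m.headD []).length : Int)) - 1 - (k : Int)) 0)) := by
  unfold transponeeriK
  have hc : m.foldl
      (fun st a =>
        let ridade := st.1 + 1
        let veergude := if ridade = 1 then a.foldl (fun c _ => c + 1) st.2 else st.2
        (ridade, veergude)) ((0 : Int), (0 : Int))
      = ((m.length : Int), ((m.headD []).length : Int)) := by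
    cases m with
    | nil => simp
    | cons r0 rest =>
      simp only [List.foldl_cons]
      rw [pv_len_fold r0 0,
        pv_count_fold rest (0 + 1) _ (by norm_num)]
      simp only [List.length_cons, List.headD_cons, Prod.mk.injEq]
      refine ⟨by push_cast; ring, by norm_num⟩
  rw [hc]
  simp only [PySem.List.foldl_append_singleton_eq_map, List.nil_append]
  -- inner loop is a map over the reversed rows
  have hinner : ∀ i : Int,
      (PySem.List.pyRange ((m.length : Int) - 1) (-1) (-1)).map
        (fun j => PySem.List.pyGetD (PySem.List.pyGetD m j []) i 0)
      = m.reverse.map (fun row => PySem.List.pyGetD row i 0) := by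
    intro i
    rw [← pv_rows_reversed m, List.map_map]
    rfl
  -- outer countdown index range as a forward Nat range
  rw [PySem.List.pyRange_neg_one (((m.headD []).length : Int) - 1) (-1)]
  simp only [sub_neg_eq_add, sub_add_cancel, Int.toNat_natCast, List.map_map]
  refine List.map_congr_left ?_
  intro k _
  simp only [Function.comp]
  rw [hinner]

-- scatter inner pass: one row distributed into buckets a..v-1
lemma pv_scatter_inner (g : Int → Int) (v : Int) (hv : 0 ≤ v) :
    ∀ (n a : Nat) (res : List (List Int)), v.toNat = a + n → res.length = v.toNat →
    (PySem.List.pyRange (a : Int) v 1).foldl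
      (fun res2 oi => PySem.List.pySetD res2 oi
        (PySem.List.pyGetD res2 oi [] ++ [g oi])) res
    = (List.range res.length).map
        (fun (k : Nat) => if a ≤ k then res.getD k [] ++ [g (k : Int)] else res.getD k []) := by
  intro n
  induction n with
  | zero =>
    intro a res hn hlen
    have hva : v = (a : Int) := by omega
    rw [PySem.List.pyRange_one_eq_nil (by omega)]
    simp only [List.foldl_nil]
    have hmap : (List.range res.length).map
        (fun (k : Nat) => if a ≤ k then res.getD k [] ++ [g (k : Int)] else res.getD k [])
        = (List.range res.length).map (fun k => res.getD k []) := by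
      refine List.map_congr_left ?_
      intro k hk
      simp only [List.mem_range] at hk
      have : ¬ a ≤ k := by omega
      simp [this]
    rw [hmap, pv_map_getD_range]
  | succ n ih =>
    intro a res hn hlen
    have hav : (a : Int) < v := by omega
    rw [PySem.List.pyRange_one_cons hav, List.foldl_cons]
    have hcast : (a : Int) + 1 = ((a + 1 : Nat) : Int) := by push_cast; ring
    rw [hcast]
    have halen : a < res.length := by omega
    set res' := PySem.List.pySetD res (a : Int)
        (PySem.List.pyGetD res (a : Int) [] ++ [g (a : Int)]) with hres'
    have hres'eq : res' = res.set a (res.getD a [] ++ [g (a : Int)]) := by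
      rw [hres', PySem.List.pySetD_natCast, PySem.List.pyGetD_natCast]
    have hlen' : res'.length = v.toNat := by rw [hres'eq]; simpa using hlen
    rw [ih (a + 1) res' (by omega) hlen']
    rw [hlen', ← hlen]
    refine List.map_congr_left ?_
    intro k hk
    simp only [List.mem_range] at hk
    have hgetD : res'.getD k [] =
        if k = a then res.getD a [] ++ [g (a : Int)] else res.getD k [] := by
      rw [hres'eq]
      by_cases hka : k = a
      · subst hka
        rw [if_pos rfl, List.getD_eq_getElem _ [] (by simpa using halen), List.getElem_set_self]
      · rw [if_neg hka]
        simp only [List.getD]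
        rw [List.getElem?_set_ne (by omega)]
    rw [hgetD]
    by_cases hka : k = a
    · subst hka
      rw [if_pos rfl, if_neg (by omega : ¬ k + 1 ≤ k), if_pos (le_refl k)]
    · rw [if_neg hka]
      by_cases hak : a ≤ k
      · rw [if_pos (by omega : a + 1 ≤ k), if_pos hak]
      · rw [if_neg (by omega : ¬ a + 1 ≤ k), if_neg hak]

lemma pv_scatter_inner0 (g : Int → Int) (v : Int) (hv : 0 ≤ v)
    (res : List (List Int)) (hlen : res.length = v.toNat) :
    (PySem.List.pyRange 0 v 1).foldl
      (fun res2 oi => PySem.List.pySetD res2 oi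
        (PySem.List.pyGetD res2 oi [] ++ [g oi])) res
    = (List.range res.length).map (fun (k : Nat) => res.getD k [] ++ [g (k : Int)]) := by
  have h := pv_scatter_inner g v hv v.toNat 0 res (by omega) hlen
  rw [show ((0 : Nat) : Int) = 0 from rfl] at h
  rw [h]
  refine List.map_congr_left ?_
  intro k _
  simp

-- scatter over all rows: bucket k collects column (v-1-k) of each processed row
lemma pv_scatter_rows (v : Int) (hv : 0 ≤ v) :
    ∀ (R res : List (List Int)), res.length = v.toNat →
    R.foldl (fun res row =>
        (PySem.List.pyRange 0 v 1).foldl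
          (fun res2 oi => PySem.List.pySetD res2 oi
            (PySem.List.pyGetD res2 oi [] ++ [PySem.List.pyGetD row (v - 1 - oi) 0])) res) res
    = (List.range res.length).map
        (fun (k : Nat) => res.getD k [] ++ R.map (fun row => PySem.List.pyGetD row (v - 1 - (k : Int)) 0)) := by
  intro R
  induction R with
  | nil =>
    intro res hlen
    simp only [List.foldl_nil, List.map_nil, List.append_nil]
    exact (pv_map_getD_range res).symm
  | cons row R ih =>
    intro res hlen
    rw [List.foldl_cons]
    rw [pv_scatter_inner0 (fun oi => PySem.List.pyGetD row (v - 1 - oi) 0) v hv res hlen]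
    set res₁ := (List.range res.length).map
        (fun k => res.getD k [] ++ [PySem.List.pyGetD row (v - 1 - (k : Int)) 0]) with hres₁
    have hlen₁ : res₁.length = v.toNat := by simp [hres₁, hlen]
    rw [ih res₁ hlen₁, hlen₁, ← hlen]
    refine List.map_congr_left ?_
    intro k hk
    simp only [List.mem_range] at hk
    rw [hres₁, pv_getD_map_range_lt _ _ _ hk]
    simp [List.append_assoc]

-- B's closed form, identical to A's
lemma pv_B_eq (m : List (List Int)) :
    transponeeriK_alt m =
      (List.range (m.headD []).length).map
        (fun (k : Nat) => m.reverse.map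
          (fun row => PySem.List.pyGetD row ((((m.headD []).length : Int)) - 1 - (k : Int)) 0)) := by
  cases m with
  | nil => simp [transponeeriK_alt]
  | cons r0 rest =>
    unfold transponeeriK_alt
    simp only [List.headD_cons]
    set v : Int := (r0.length : Int) with hv
    have hv0 : 0 ≤ v := by positivity
    set init : List (List Int) := (PySem.List.pyRange 0 v 1).map (fun _ => []) with hinit
    have hlen : init.length = v.toNat := by
      simp [hinit, PySem.List.length_pyRange_one]
    rw [pv_scatter_rows v hv0 (r0 :: rest).reverse init hlen, hlen]
    have hvt : v.toNat = r0.length := by simp [hv]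
    rw [hvt]
    refine List.map_congr_left ?_
    intro k hk
    simp only [List.mem_range] at hk
    have hknil : init.getD k [] = [] := by
      have : init = List.replicate init.length [] := by
        rw [hinit, List.map_const']
        simp
      rw [this]
      simp only [List.getD]
      rcases Nat.lt_or_ge k (List.replicate init.length ([] : List Int)).length with h | h
      · rw [List.getElem?_eq_getElem h]; simp
      · rw [List.getElem?_eq_none h]; rfl
    rw [hknil, List.nil_append]

-- ===== VERDICT (by name: the statement is the Claim_ definition above) =====
theorem transponeeriK_spec : Claim_equal_transponeeriK := by
  intro m _ _
  unfold Spec_transponeeriK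
  rw [pv_A_eq, pv_B_eq]
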